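-- pv_equiv track=rewrite | github.com/dcreemer/adventofcode | 2024/python/src/aoc2024/day02.py | is_valid_damped_report
-- ===== SOURCE A (Python) =====
-- def is_valid_report(report: list[int]) -> bool:
--     """
--     a valid report is always strictly ascending or descending,
--     with a delta between numbers of 1 <= delta <= 4
--     """
--     deltas = [report[i] - report[i - 1] for i in range(1, len(report))]
--     return all(delta > 0 and delta < 4 for delta in deltas) or all(
--         delta > -4 and delta < 0 for delta in deltas
--     )
--
-- def is_valid_damped_report(report: list[int]) -> bool:
--     """
--     a valid /damped/ report is always strictly ascending or descending,
--     with a delta between numbers of 1 <= delta <= 4, or *could* be if one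
--     single report number were removed
--     """
--     if is_valid_report(report):
--         return True
--     for i in range(len(report)):
--         damped = report[:]
--         del damped[i]
--         if is_valid_report(damped):
--             return True
--     return False
-- ===== SOURCE B (Python) =====
-- def _chain_ok(report, lo, hi):
--     # all adjacent deltas within [lo, hi]
--     return all(lo <= b - a <= hi for a, b in zip(report, report[1:]))
--
-- def _first_bad(report, lo, hi):
--     # index of the first adjacent pair whose delta is outside [lo, hi], or None
--     for j, (a, b) in enumerate(zip(report, report[1:])):
--         if not (lo <= b - a <= hi):
--             return j
--     return None
--
-- def _damped_dir(report, lo, hi):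
--     j = _first_bad(report, lo, hi)
--     if j is None:
--         return True
--     return _chain_ok(report[:j] + report[j + 1:], lo, hi) or \
--         _chain_ok(report[:j + 1] + report[j + 2:], lo, hi)
--
-- def is_valid_damped_report(report: list[int]) -> bool:
--     # a removal can only help at the first violating pair: try its two endpoints
--     return _damped_dir(report, 1, 3) or _damped_dir(report, -3, -1)
-- ===== Notes on version B (the rewrite author's own statement) =====
-- stated objective: faster
-- what changed: Instead of re-validating the whole report after deleting each of the n indices, B scans once per direction, finds the first violating adjacent pair, and only tests the two candidate removals at that pair.
import Mathlib
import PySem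

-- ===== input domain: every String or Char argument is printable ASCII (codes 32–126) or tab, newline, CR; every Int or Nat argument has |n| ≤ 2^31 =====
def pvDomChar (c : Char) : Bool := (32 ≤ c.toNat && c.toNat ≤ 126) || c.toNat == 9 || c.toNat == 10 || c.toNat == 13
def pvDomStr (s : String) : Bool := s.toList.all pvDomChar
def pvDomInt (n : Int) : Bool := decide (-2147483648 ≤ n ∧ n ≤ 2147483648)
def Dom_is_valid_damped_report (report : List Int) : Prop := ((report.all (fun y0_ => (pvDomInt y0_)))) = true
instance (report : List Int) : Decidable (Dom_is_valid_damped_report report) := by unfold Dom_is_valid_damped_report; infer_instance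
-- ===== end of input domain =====

-- B replaces A's "try deleting every index" O(n^2) scan by a single-pass check that
-- repairs only at the first violating pair (objective: faster, asymptotic O(n)).

-- ===== PORT A =====
def is_valid_report (report : List Int) : Bool :=
  -- deltas = [report[i] - report[i-1] for i in range(1, len(report))]  (indices always in range)
  let deltas := (PySem.List.pyRange 1 (report.length : Int) 1).map
    (fun i => PySem.List.pyGetD report i 0 - PySem.List.pyGetD report (i - 1) 0)
  (deltas.all fun d => decide (d > 0) && decide (d < 4)) ||
    (deltas.all fun d => decide (d > -4) && decide (d < 0))

def is_valid_damped_report (report : List Int) : Bool :=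
  if is_valid_report report then true
  else
    -- for i in range(len(report)): damped = report[:]; del damped[i]; if valid: return True
    (PySem.List.pyRange 0 (report.length : Int) 1).any
      (fun i => is_valid_report (report.eraseIdx i.toNat))

-- ===== PORT B =====
def pvChainOk (report : List Int) (lo hi : Int) : Bool :=
  -- all(lo <= b - a <= hi for a, b in zip(report, report[1:]))
  (report.zip report.tail).all (fun p => decide (lo ≤ p.2 - p.1) && decide (p.2 - p.1 ≤ hi))

def pvFirstBad (report : List Int) (lo hi : Int) : Option Nat :=
  -- first j with delta out of [lo, hi], else None (for/enumerate with early return)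
  (report.zip report.tail).findIdx? (fun p => !(decide (lo ≤ p.2 - p.1) && decide (p.2 - p.1 ≤ hi)))

def pvDampedDir (report : List Int) (lo hi : Int) : Bool :=
  match pvFirstBad report lo hi with
  | none => true
  | some j =>
      pvChainOk (PySem.List.slice report none (some (j : Int)) ++
                 PySem.List.slice report (some ((j : Int) + 1)) none) lo hi ||
      pvChainOk (PySem.List.slice report none (some ((j : Int) + 1)) ++
                 PySem.List.slice report (some ((j : Int) + 2)) none) lo hi

def is_valid_damped_report_alt (report : List Int) : Bool :=
  pvDampedDir report 1 3 || pvDampedDir report (-3) (-1)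

-- ===== PRECONDITION & SPEC =====
def Spec_is_valid_damped_report (report : List Int) (out : Bool) : Prop := out = is_valid_damped_report_alt report
instance (report : List Int) (out : Bool) : Decidable (Spec_is_valid_damped_report report out) := by unfold Spec_is_valid_damped_report; infer_instance

-- ===== CLAIM (what is proved, stated in full; the proofs are below) =====
def Claim_equal_is_valid_damped_report : Prop := ∀ (report : List Int), Dom_is_valid_damped_report report → Spec_is_valid_damped_report report (is_valid_damped_report report)

-- ===== LEMMAS AND PROOFS =====

-- structural form of "every adjacent delta satisfies p"
def chainR (p : Int → Int → Bool) : List Int → Bool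
  | [] => true
  | [_] => true
  | x :: y :: t => p x y && chainR p (y :: t)

-- structural form of "index of first adjacent pair violating p"
def firstBadR (p : Int → Int → Bool) : List Int → Option Nat
  | [] => none
  | [_] => none
  | x :: y :: t => if p x y then (firstBadR p (y :: t)).map (· + 1) else some 0

lemma all_zip_tail (q : Int × Int → Bool) (r : List Int) :
    (r.zip r.tail).all q = chainR (fun a b => q (a, b)) r := by
  induction r with
  | nil => rfl
  | cons x t ih =>
      cases t with
      | nil => rfl
      | cons y t' =>
          simp only [List.tail_cons] at ih
          simp [chainR, ih]

lemma findIdx?_zip_tail (q : Int × Int → Bool) (r : List Int) :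
    (r.zip r.tail).findIdx? q = firstBadR (fun a b => !q (a, b)) r := by
  induction r with
  | nil => rfl
  | cons x t ih =>
      cases t with
      | nil => rfl
      | cons y t' =>
          simp only [List.tail_cons] at ih
          simp only [List.tail_cons, List.zip_cons_cons, List.findIdx?_cons, firstBadR]
          rw [ih]
          by_cases hq : q (x, y) <;> simp [hq]

lemma chainR_cons_tail (p : Int → Int → Bool) (x : Int) (l : List Int)
    (h : chainR p (x :: l) = true) : chainR p l = true := by
  cases l with
  | nil => rfl
  | cons y t => exact Bool.and_elim_right h

lemma firstBadR_none_iff (p : Int → Int → Bool) (r : List Int) :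
    firstBadR p r = none ↔ chainR p r = true := by
  induction r with
  | nil => simp [firstBadR, chainR]
  | cons x t ih =>
      cases t with
      | nil => simp [firstBadR, chainR]
      | cons y t' =>
          by_cases hp : p x y = true <;> simp [firstBadR, chainR, hp, ih]

lemma firstBadR_some_lt (p : Int → Int → Bool) (r : List Int) (j : Nat)
    (h : firstBadR p r = some j) : j + 1 < r.length := by
  induction r generalizing j with
  | nil => simp [firstBadR] at h
  | cons x t ih =>
      cases t with
      | nil => simp [firstBadR] at h
      | cons y t' =>
          by_cases hp : p x y = true
          · simp only [firstBadR, if_pos hp, Option.map_eq_some_iff] at h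
            obtain ⟨j', hj', rfl⟩ := h
            have := ih j' hj'
            simp at this ⊢; omega
          · simp only [firstBadR, if_neg hp, Option.some_inj] at h
            subst h; simp

lemma firstBadR_some_erase (p : Int → Int → Bool) (r : List Int) (j : Nat)
    (h : firstBadR p r = some j) :
    ∀ i : Nat, i ≠ j → i ≠ j + 1 → chainR p (r.eraseIdx i) = false := by
  induction r generalizing j with
  | nil => simp [firstBadR] at h
  | cons x t ih =>
      cases t with
      | nil => simp [firstBadR] at h
      | cons y t' =>
          intro i hij hij1
          by_cases hp : p x y = true
          · simp only [firstBadR, if_pos hp, Option.map_eq_some_iff] at h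
            obtain ⟨j', hj', rfl⟩ := h
            cases i with
            | zero =>
                have : firstBadR p (y :: t') ≠ none := by simp [hj']
                have hc := (not_iff_not.mpr (firstBadR_none_iff p (y :: t'))).mp this
                simpa [List.eraseIdx] using Bool.not_eq_true _ |>.mp hc
            | succ i' =>
                have h1 : i' ≠ j' := by omega
                have h2 : i' ≠ j' + 1 := by omega
                have hrec := ih j' hj' i' h1 h2
                have : (x :: y :: t').eraseIdx (i' + 1) = x :: ((y :: t').eraseIdx i') := rfl
                rw [this]
                cases hc : chainR p (x :: (y :: t').eraseIdx i') with
                | false => rfl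
                | true => exact absurd (chainR_cons_tail p x _ hc) (by simp [hrec])
          · simp only [firstBadR, if_neg hp, Option.some_inj] at h
            subst h
            match i, hij, hij1 with
            | i'' + 2, _, _ =>
                have : (x :: y :: t').eraseIdx (i'' + 2) = x :: y :: t'.eraseIdx i'' := rfl
                rw [this]
                simp [chainR, hp]

lemma any_erase_eq (p : Int → Int → Bool) (r : List Int) (j : Nat)
    (h : firstBadR p r = some j) :
    (List.range r.length).any (fun i => chainR p (r.eraseIdx i)) =
      (chainR p (r.eraseIdx j) || chainR p (r.eraseIdx (j + 1))) := by
  rw [Bool.eq_iff_iff]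
  simp only [List.any_eq_true, List.mem_range, Bool.or_eq_true]
  constructor
  · rintro ⟨i, hi, hci⟩
    by_cases hij : i = j
    · subst hij; exact Or.inl hci
    · by_cases hij1 : i = j + 1
      · subst hij1; exact Or.inr hci
      · exact absurd hci (by simp [firstBadR_some_erase p r j h i hij hij1])
  · have hlen := firstBadR_some_lt p r j h
    rintro (hc | hc)
    · exact ⟨j, by omega, hc⟩
    · exact ⟨j + 1, by omega, hc⟩

-- B's per-direction check, expressed through chainR / firstBadR
lemma pvDampedDir_eq (report : List Int) (lo hi : Int) :
    pvDampedDir report lo hi =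
      (chainR (fun a b => decide (lo ≤ b - a) && decide (b - a ≤ hi)) report ||
        (List.range report.length).any
          (fun i => chainR (fun a b => decide (lo ≤ b - a) && decide (b - a ≤ hi))
            (report.eraseIdx i))) := by
  set p : Int → Int → Bool := fun a b => decide (lo ≤ b - a) && decide (b - a ≤ hi) with hp
  have hfb : pvFirstBad report lo hi = firstBadR p report := by
    unfold pvFirstBad
    rw [findIdx?_zip_tail]
    simp [hp]
  have hco : ∀ l : List Int, pvChainOk l lo hi = chainR p l := by
    intro l; unfold pvChainOk; rw [all_zip_tail]
  unfold pvDampedDir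
  rw [hfb]
  cases hf : firstBadR p report with
  | none =>
      have := (firstBadR_none_iff p report).mp hf
      simp [this]
  | some j =>
      have hne : chainR p report = false := by
        cases hc : chainR p report with
        | false => rfl
        | true => exact absurd ((firstBadR_none_iff p report).mpr hc) (by simp [hf])
      have e1 : PySem.List.slice report none (some (j : Int)) ++
          PySem.List.slice report (some ((j : Int) + 1)) none = report.eraseIdx j := by
        rw [PySem.List.slice_to_natCast]
        have : ((j : Int) + 1) = ((j + 1 : Nat) : Int) := by push_cast; ring
        rw [this, PySem.List.slice_from_natCast, ← List.eraseIdx_eq_take_drop_succ]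
      have e2 : PySem.List.slice report none (some ((j : Int) + 1)) ++
          PySem.List.slice report (some ((j : Int) + 2)) none = report.eraseIdx (j + 1) := by
        have h1 : ((j : Int) + 1) = ((j + 1 : Nat) : Int) := by push_cast; ring
        have h2 : ((j : Int) + 2) = ((j + 2 : Nat) : Int) := by push_cast; ring
        rw [h1, h2, PySem.List.slice_to_natCast, PySem.List.slice_from_natCast,
          ← List.eraseIdx_eq_take_drop_succ]
      simp only [hco, e1, e2, hne, any_erase_eq p report j hf, Bool.false_or]

-- A's delta list is the list of adjacent differences
lemma deltas_aux (r : List Int) :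
    (List.range (r.length - 1)).map
        ((fun i => PySem.List.pyGetD r i 0 - PySem.List.pyGetD r (i - 1) 0) ∘
          fun k : Nat => (1 : Int) + ↑k) =
      (r.zip r.tail).map (fun p => p.2 - p.1) := by
  induction r with
  | nil => rfl
  | cons x t ih =>
      cases t with
      | nil => rfl
      | cons y t' =>
          have hlt : (x :: y :: t').length - 1 = ((y :: t').length - 1) + 1 := by simp
          rw [hlt, List.range_succ_eq_map, List.map_cons, List.map_map]
          have h0 : ((fun i => PySem.List.pyGetD (x :: y :: t') i 0 -
              PySem.List.pyGetD (x :: y :: t') (i - 1) 0) ∘ fun k : Nat => (1 : Int) + ↑k) 0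
              = y - x := by
            simp [PySem.List.pyGetD_ofNat']
          have hcomp : (((fun i => PySem.List.pyGetD (x :: y :: t') i 0 -
                PySem.List.pyGetD (x :: y :: t') (i - 1) 0) ∘ fun k : Nat => (1 : Int) + ↑k) ∘
                Nat.succ) =
              ((fun i => PySem.List.pyGetD (y :: t') i 0 -
                PySem.List.pyGetD (y :: t') (i - 1) 0) ∘ fun k : Nat => (1 : Int) + ↑k) := by
            funext k
            simp only [Function.comp_apply]
            rw [show (1 : Int) + (↑(Nat.succ k) : Int) = ((k + 2 : Nat) : Int) by push_cast; ring,
              show ((k + 2 : Nat) : Int) - 1 = ((k + 1 : Nat) : Int) by push_cast; ring,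
              show (1 : Int) + ((k : Nat) : Int) = ((k + 1 : Nat) : Int) by push_cast; ring]
            rw [show ((k + 1 : Nat) : Int) - 1 = ((k : Nat) : Int) by push_cast; ring]
            simp only [PySem.List.pyGetD_natCast]
            simp [List.getD]
          rw [h0, hcomp, ih]
          simp

lemma deltas_eq (r : List Int) :
    (PySem.List.pyRange 1 (r.length : Int) 1).map
        (fun i => PySem.List.pyGetD r i 0 - PySem.List.pyGetD r (i - 1) 0) =
      (r.zip r.tail).map (fun p => p.2 - p.1) := by
  rw [PySem.List.pyRange_one, List.map_map]
  have hlen : (((r.length : Int)) - 1).toNat = r.length - 1 := by omega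
  rw [hlen]
  exact deltas_aux r

-- A's is_valid_report, expressed through chainR with B's bounds
lemma is_valid_report_eq (r : List Int) :
    is_valid_report r =
      (chainR (fun a b => decide ((1:Int) ≤ b - a) && decide (b - a ≤ 3)) r ||
        chainR (fun a b => decide ((-3:Int) ≤ b - a) && decide (b - a ≤ -1)) r) := by
  unfold is_valid_report
  rw [deltas_eq]
  simp only [List.all_map]
  rw [show ((fun d : Int => decide (d > 0) && decide (d < 4)) ∘ fun p : Int × Int => p.2 - p.1)
      = (fun p : Int × Int => decide ((1:Int) ≤ p.2 - p.1) && decide (p.2 - p.1 ≤ 3)) by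
    funext p
    rw [Bool.eq_iff_iff]
    simp only [Function.comp_apply, Bool.and_eq_true, decide_eq_true_eq]
    omega]
  rw [show ((fun d : Int => decide (d > -4) && decide (d < 0)) ∘ fun p : Int × Int => p.2 - p.1)
      = (fun p : Int × Int => decide ((-3:Int) ≤ p.2 - p.1) && decide (p.2 - p.1 ≤ -1)) by
    funext p
    rw [Bool.eq_iff_iff]
    simp only [Function.comp_apply, Bool.and_eq_true, decide_eq_true_eq]
    omega]
  rw [all_zip_tail, all_zip_tail]

lemma any_pyRange_toNat (n : Nat) (g : Nat → Bool) :
    (PySem.List.pyRange 0 (n : Int) 1).any (fun i => g i.toNat) = (List.range n).any g := by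
  rw [PySem.List.pyRange_zero_nat, List.any_map]
  simp [Function.comp_def]

lemma any_or_distrib (l : List Nat) (f g : Nat → Bool) :
    l.any (fun i => f i || g i) = (l.any f || l.any g) := by
  rw [Bool.eq_iff_iff]
  simp only [List.any_eq_true, Bool.or_eq_true]
  constructor
  · rintro ⟨i, hi, h | h⟩
    · exact Or.inl ⟨i, hi, h⟩
    · exact Or.inr ⟨i, hi, h⟩
  · rintro (⟨i, hi, h⟩ | ⟨i, hi, h⟩)
    · exact ⟨i, hi, Or.inl h⟩
    · exact ⟨i, hi, Or.inr h⟩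

-- ===== VERDICT (by name: the statement is the Claim_ definition above) =====
theorem is_valid_damped_report_spec : Claim_equal_is_valid_damped_report := by
  intro report _
  unfold Spec_is_valid_damped_report is_valid_damped_report is_valid_damped_report_alt
  rw [pvDampedDir_eq, pvDampedDir_eq]
  set pA : Int → Int → Bool := fun a b => decide ((1:Int) ≤ b - a) && decide (b - a ≤ 3)
  set pD : Int → Int → Bool := fun a b => decide ((-3:Int) ≤ b - a) && decide (b - a ≤ -1)
  have hv : ∀ l : List Int, is_valid_report l = (chainR pA l || chainR pD l) :=
    fun l => is_valid_report_eq l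
  rw [any_pyRange_toNat report.length (fun i => is_valid_report (report.eraseIdx i))]
  by_cases h : is_valid_report report = true
  · rw [if_pos h]
    have hthis := (hv report) ▸ h
    rw [Bool.or_eq_true] at hthis
    rcases hthis with ha | hd
    · simp [ha]
    · simp [hd]
  · rw [if_neg h]
    have hff := (hv report) ▸ (Bool.not_eq_true _ |>.mp h)
    obtain ⟨ha, hd⟩ := Bool.or_eq_false_iff.mp hff
    rw [show (fun i => is_valid_report (report.eraseIdx i)) =
        (fun i => chainR pA (report.eraseIdx i) || chainR pD (report.eraseIdx i)) by
      funext i; exact hv _]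
    rw [any_or_distrib, ha, hd]
    simp
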